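-- pv_equiv track=rewrite | github.com/Pherakki/SimpleDSCSModManager | libs/dscs_model_tools/FileInterfaces/AnimInterface.py | boil_down_chunk
-- ===== SOURCE A (Python) =====
-- def boil_down_chunk(chunk):
--     bitvector = ''
--     reduced_chunk = []
--     indices = []
--     for j, value in enumerate(chunk):
--         if value is None:
--             bitvector += '0'
--         else:
--             bitvector += '1'
--             reduced_chunk.append(value)
--             indices.append(j)
--     return reduced_chunk, bitvector, indices
-- ===== SOURCE B (Python) =====
-- def boil_down_chunk(chunk):
--     # Index table first, then index-driven passes derive the values and the bitvector.
--     indices = [j for j, v in enumerate(chunk) if v is not None]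
--     reduced_chunk = [chunk[j] for j in indices]
--     idx = set(indices)
--     bitvector = ''.join('1' if j in idx else '0' for j in range(len(chunk)))
--     return reduced_chunk, bitvector, indices
-- ===== Notes on version B (the rewrite author's own statement) =====
-- stated objective: alternative
-- what changed: Replaces A's single fused loop with an index-table decomposition: build indices first, then derive the values by indexing back into chunk and the bitvector by set-membership over range(len(chunk)).
import Mathlib
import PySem

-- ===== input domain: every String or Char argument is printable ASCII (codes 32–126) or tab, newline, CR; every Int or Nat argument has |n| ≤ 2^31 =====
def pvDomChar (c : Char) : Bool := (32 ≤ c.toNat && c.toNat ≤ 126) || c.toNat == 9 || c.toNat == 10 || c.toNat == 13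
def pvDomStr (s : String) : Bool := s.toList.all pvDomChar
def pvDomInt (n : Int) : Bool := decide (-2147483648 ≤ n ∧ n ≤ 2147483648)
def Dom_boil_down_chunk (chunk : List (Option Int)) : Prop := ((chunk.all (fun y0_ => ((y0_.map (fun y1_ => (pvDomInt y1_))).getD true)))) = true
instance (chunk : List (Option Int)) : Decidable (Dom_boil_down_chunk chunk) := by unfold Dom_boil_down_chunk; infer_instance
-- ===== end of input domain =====

-- B decomposes A's single fused loop into an index table plus index-driven passes (alternative decomposition, same cost).

-- ===== PORT A =====
-- the bitvector string is carried as its List Char and wrapped with String.ofList at the end (exact: only single-char appends)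
def boil_down_chunk (chunk : List (Option Int)) : List Int × String × List Int :=
  let st := (PySem.List.enumerate chunk 0).foldl
    (fun (s : List Char × List Int × List Int) p =>
      match p.2 with
      | none => (s.1 ++ ['0'], s.2.1, s.2.2)
      | some v => (s.1 ++ ['1'], s.2.1 ++ [v], s.2.2 ++ [p.1]))
    ([], [], [])
  (st.2.1, String.ofList st.1, st.2.2)

-- ===== PORT B =====
-- chunk[j] with j drawn from the index table is always in range and non-None; the defaults of
-- pyGetD/getD are never reached there. ''.join of single-char pieces is String.ofList of the char list (exact).
def boil_down_chunk_alt (chunk : List (Option Int)) : List Int × String × List Int :=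
  let indices : List Int :=
    (PySem.List.enumerate chunk 0).filterMap (fun p => if p.2.isSome then some p.1 else none)
  let reduced_chunk : List Int := indices.map (fun j => (PySem.List.pyGetD chunk j none).getD 0)
  let idx : PySem.Set Int := PySem.Set.ofList indices
  let bitvector : List Char :=
    (PySem.List.pyRange 0 (chunk.length : Int)).map (fun j => if idx.contains j then '1' else '0')
  (reduced_chunk, String.ofList bitvector, indices)

-- ===== PRECONDITION & SPEC =====
def Spec_boil_down_chunk (chunk : List (Option Int)) (out : List Int × String × List Int) : Prop := out = boil_down_chunk_alt chunk
instance (chunk : List (Option Int)) (out : List Int × String × List Int) : Decidable (Spec_boil_down_chunk chunk out) := by unfold Spec_boil_down_chunk; infer_instance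

-- ===== CLAIM (what is proved, stated in full; the proofs are below) =====
def Claim_equal_boil_down_chunk : Prop := ∀ (chunk : List (Option Int)), Dom_boil_down_chunk chunk → Spec_boil_down_chunk chunk (boil_down_chunk chunk)

-- ===== LEMMAS AND PROOFS =====

-- proof-side characterisations of the three components
def pvBits (xs : List (Option Int)) : List Char :=
  xs.map (fun v => match v with | none => '0' | some _ => '1')

def pvIdxs (xs : List (Option Int)) (s : Int) : List Int :=
  (PySem.List.enumerate xs s).filterMap (fun p => if p.2.isSome then some p.1 else none)

theorem pvIdxs_cons (x : Option Int) (xs : List (Option Int)) (s : Int) :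
    pvIdxs (x :: xs) s = (if x.isSome then [s] else []) ++ pvIdxs xs (s + 1) := by
  cases x <;> simp [pvIdxs, PySem.List.enumerate_cons]

-- A's fold, characterised with arbitrary accumulators
theorem pvFoldA (xs : List (Option Int)) (s : Int) (bv : List Char) (rc ind : List Int) :
    (PySem.List.enumerate xs s).foldl
      (fun (st : List Char × List Int × List Int) p =>
        match p.2 with
        | none => (st.1 ++ ['0'], st.2.1, st.2.2)
        | some v => (st.1 ++ ['1'], st.2.1 ++ [v], st.2.2 ++ [p.1]))
      (bv, rc, ind)
    = (bv ++ pvBits xs, rc ++ xs.filterMap id, ind ++ pvIdxs xs s) := by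
  induction xs generalizing s bv rc ind with
  | nil => simp [pvBits, pvIdxs, PySem.List.enumerate]
  | cons x xs ih =>
    cases x <;>
      simp [PySem.List.enumerate_cons, List.foldl_cons, ih, pvBits, pvIdxs_cons]

-- B's value pass: indexing back into (pre ++ xs) at the indices of xs recovers xs.filterMap id
theorem pvValues (xs pre : List (Option Int)) :
    (pvIdxs xs (pre.length : Int)).map
        (fun j => (PySem.List.pyGetD (pre ++ xs) j none).getD 0)
    = xs.filterMap id := by
  induction xs generalizing pre with
  | nil => simp [pvIdxs, PySem.List.enumerate]
  | cons x xs ih =>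
    have hget : PySem.List.pyGetD (pre ++ x :: xs) (pre.length : Int) none = x := by
      rw [PySem.List.pyGetD_natCast]
      simp [List.getD]
    have htail := ih (pre ++ [x])
    simp only [List.append_assoc, List.singleton_append, List.length_append,
      List.length_singleton] at htail
    have hcast : ((pre.length : Int) + 1) = ((pre.length + 1 : Nat) : Int) := by push_cast; ring
    cases x with
    | none =>
      rw [pvIdxs_cons, hcast]
      simpa using htail
    | some v =>
      rw [pvIdxs_cons, hcast]
      simp only [Option.isSome_some, ite_true, List.singleton_append, List.map_cons, hget,
        Option.getD_some, htail]
      simp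

theorem pvMemIdxs (xs : List (Option Int)) (k : Nat) (hk : k < xs.length) :
    ((k : Int) ∈ pvIdxs xs 0) ↔ (xs[k]).isSome := by
  simp only [pvIdxs, List.mem_filterMap]
  constructor
  · rintro ⟨p, hp, hcond⟩
    rw [PySem.List.mem_enumerate_iff] at hp
    obtain ⟨m, hm, rfl⟩ := hp
    by_cases h : (xs[m]).isSome
    · simp only [h, ite_true, Option.some.injEq, zero_add, Nat.cast_inj] at hcond
      subst hcond; exact h
    · simp [h] at hcond
  · intro h
    exact ⟨((k : Int), xs[k]), by rw [PySem.List.mem_enumerate_iff]; exact ⟨k, hk, by simp⟩,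
      by simp [h]⟩

-- B's bitvector pass equals pvBits
theorem pvBitvec (xs : List (Option Int)) :
    (PySem.List.pyRange 0 (xs.length : Int)).map
        (fun j => if (PySem.Set.ofList (pvIdxs xs 0)).contains j then '1' else '0')
    = pvBits xs := by
  rw [PySem.List.pyRange_zero_natCast, List.map_map]
  apply List.ext_getElem (by simp [pvBits])
  intro k h1 h2
  have hk : k < xs.length := by simpa using h1
  have hiff := pvMemIdxs xs k hk
  have hy : (PySem.Set.ofList (pvIdxs xs 0)).contains (k : Int) = (xs[k]).isSome := by
    by_cases h : (xs[k]).isSome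
    · simp [PySem.Set.mem_ofList, hiff, h]
    · simp only [Bool.not_eq_true] at h
      simp [PySem.Set.mem_ofList, hiff, h]
  simp only [List.getElem_map, List.getElem_range, Function.comp_apply, pvBits, hy]
  cases xs[k] <;> simp

theorem pvAltEq (chunk : List (Option Int)) :
    boil_down_chunk_alt chunk
    = (chunk.filterMap id, String.ofList (pvBits chunk), pvIdxs chunk 0) := by
  show ((pvIdxs chunk 0).map (fun j => (PySem.List.pyGetD chunk j none).getD 0),
        String.ofList ((PySem.List.pyRange 0 (chunk.length : Int)).map
          (fun j => if (PySem.Set.ofList (pvIdxs chunk 0)).contains j then '1' else '0')),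
        pvIdxs chunk 0) = _
  rw [pvBitvec chunk]
  have hv := pvValues chunk []
  simp only [List.length_nil, Nat.cast_zero, List.nil_append] at hv
  rw [hv]

-- ===== VERDICT (by name: the statement is the Claim_ definition above) =====
theorem boil_down_chunk_spec : Claim_equal_boil_down_chunk := by
  intro chunk _
  show boil_down_chunk chunk = boil_down_chunk_alt chunk
  rw [pvAltEq]
  unfold boil_down_chunk
  simp only [pvFoldA, List.nil_append]
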